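-- pv_equiv track=rewrite | github.com/sambhavnoobcoder/trinity-swe | advanced_patch_fixer.py | validate_patch_structure
-- ===== SOURCE A (Python) =====
-- def validate_patch_structure(patch: str) -> bool:
--     """Validate patch has proper structure"""
--     if not patch:
--         return False
--
--     lines = patch.split('\n')
--
--     # Must have file headers
--     has_minus = any(line.startswith('--- ') for line in lines)
--     has_plus = any(line.startswith('+++ ') for line in lines)
--
--     # Must have hunk header
--     has_hunk = any(line.startswith('@@') and line.endswith('@@') for line in lines)
--
--     # Must have changes
--     has_changes = any(line.startswith(('+', '-')) and not line.startswith(('+++', '---'))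
--                      for line in lines)
--
--     return has_minus and has_plus and has_hunk and has_changes
-- ===== SOURCE B (Python) =====
-- def validate_patch_structure(patch: str) -> bool:
--     """Validate patch has proper structure"""
--     if not patch:
--         return False
--     mask = 0
--     for line in patch.split('\n'):
--         mask |= _line_mask(line)
--     return mask == 15
--
--
-- def _line_mask(line):
--     # Classify the line into exactly one structural category (bitmask):
--     # 1 = '---' file header, 2 = '+++' file header, 4 = hunk header, 8 = change line.
--     if line.startswith('---'):
--         return 1 if line.startswith('--- ') else 0
--     if line.startswith('+++'):
--         return 2 if line.startswith('+++ ') else 0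
--     if line.startswith('+') or line.startswith('-'):
--         return 8
--     if line.startswith('@@') and line.endswith('@@'):
--         return 4
--     return 0
-- ===== Notes on version B (the rewrite author's own statement) =====
-- stated objective: alternative
-- what changed: B classifies each line into exactly one structural category (file-header-, file-header+, hunk, change) via a first-character dispatch returning a bitmask, OR-folds the masks in one pass, and accepts iff the mask is 15, instead of A's four AND-ed any() prefix scans.
import Mathlib
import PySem

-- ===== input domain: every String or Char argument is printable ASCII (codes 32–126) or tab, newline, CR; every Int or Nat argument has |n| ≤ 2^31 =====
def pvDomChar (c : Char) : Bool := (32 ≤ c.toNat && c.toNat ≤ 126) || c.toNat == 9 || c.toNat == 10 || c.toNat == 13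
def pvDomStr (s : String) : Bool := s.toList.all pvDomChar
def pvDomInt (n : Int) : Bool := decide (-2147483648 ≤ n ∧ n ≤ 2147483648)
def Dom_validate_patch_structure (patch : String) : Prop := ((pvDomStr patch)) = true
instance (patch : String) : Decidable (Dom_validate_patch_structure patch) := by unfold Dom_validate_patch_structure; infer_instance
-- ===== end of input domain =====

-- B classifies each line into exactly one structural category (first-character dispatch) and OR-folds
-- the category bits into one mask, accepting iff mask = 15; replaces A's four AND-ed any() scans.

-- ===== PORT A =====
def validate_patch_structure (patch : String) : Bool :=
  if patch == "" then false
  else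
    let lines := (PySem.Str.split? patch "\n").getD []
    let has_minus := lines.any (fun line => PySem.Str.startswith line "--- ")
    let has_plus := lines.any (fun line => PySem.Str.startswith line "+++ ")
    let has_hunk := lines.any (fun line => PySem.Str.startswith line "@@" && PySem.Str.endswith line "@@")
    let has_changes := lines.any (fun line =>
      (PySem.Str.startswith line "+" || PySem.Str.startswith line "-") &&
      !(PySem.Str.startswith line "+++" || PySem.Str.startswith line "---"))
    has_minus && has_plus && has_hunk && has_changes

-- ===== PORT B =====
-- Source B's _line_mask: classify a line into one bitmask category by its leading characters
def lineMask (line : String) : Nat :=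
  if PySem.Str.startswith line "---" then
    (if PySem.Str.startswith line "--- " then 1 else 0)
  else if PySem.Str.startswith line "+++" then
    (if PySem.Str.startswith line "+++ " then 2 else 0)
  else if PySem.Str.startswith line "+" || PySem.Str.startswith line "-" then 8
  else if PySem.Str.startswith line "@@" && PySem.Str.endswith line "@@" then 4
  else 0

def validate_patch_structure_alt (patch : String) : Bool :=
  if patch == "" then false
  else
    (((PySem.Str.split? patch "\n").getD []).foldl (fun m line => m ||| lineMask line) 0) == 15

-- ===== PRECONDITION & SPEC =====
def Spec_validate_patch_structure (patch : String) (out : Bool) : Prop := out = validate_patch_structure_alt patch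
instance (patch : String) (out : Bool) : Decidable (Spec_validate_patch_structure patch out) := by unfold Spec_validate_patch_structure; infer_instance

-- ===== CLAIM (what is proved, stated in full; the proofs are below) =====
def Claim_equal_validate_patch_structure : Prop := ∀ (patch : String), Dom_validate_patch_structure patch → Spec_validate_patch_structure patch (validate_patch_structure patch)

-- ===== LEMMAS AND PROOFS =====

def vpsBits (a b c d : Bool) : Nat :=
  (cond a 1 0) ||| (cond b 2 0) ||| (cond c 4 0) ||| (cond d 8 0)

theorem vps_sw_mono (l q p : List Char) (hqp : q <+: p)
    (h : PySem.Chars.startswith l p = true) : PySem.Chars.startswith l q = true := by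
  rw [PySem.Chars.startswith_iff] at h ⊢
  exact hqp.trans h

theorem vps_sw_head (l p : List Char) (c : Char)
    (h : PySem.Chars.startswith l (c :: p) = true) : ∃ t, l = c :: t := by
  rw [PySem.Chars.startswith_iff] at h
  obtain ⟨t, ht⟩ := h
  exact ⟨p ++ t, by rw [← ht]; rfl⟩

theorem vps_sw_head_ne (l p q : List Char) (c d : Char) (hcd : c ≠ d)
    (h : PySem.Chars.startswith l (c :: p) = true) :
    PySem.Chars.startswith l (d :: q) = false := by
  obtain ⟨t, rfl⟩ := vps_sw_head l p c h
  rw [← Bool.not_eq_true, PySem.Chars.startswith_iff]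
  rintro ⟨u, hu⟩
  exact hcd ((List.cons.injEq _ _ _ _).mp hu).1.symm

theorem vps_sw_mono_false (l q p : List Char) (hqp : q <+: p)
    (hq : PySem.Chars.startswith l q = false) : PySem.Chars.startswith l p = false := by
  cases h : PySem.Chars.startswith l p
  · rfl
  · exact absurd (vps_sw_mono l q p hqp h) (by simp [hq])

theorem lineMask_eq (line : String) :
    lineMask line = vpsBits (PySem.Str.startswith line "--- ") (PySem.Str.startswith line "+++ ")
      (PySem.Str.startswith line "@@" && PySem.Str.endswith line "@@")
      ((PySem.Str.startswith line "+" || PySem.Str.startswith line "-") &&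
        !(PySem.Str.startswith line "+++" || PySem.Str.startswith line "---")) := by
  unfold lineMask
  simp only [PySem.Str.startswith_eq, PySem.Str.endswith_eq]
  have e1 : ("---".toList : List Char) = ['-','-','-'] := by decide
  have e2 : ("--- ".toList : List Char) = ['-','-','-',' '] := by decide
  have e3 : ("+++".toList : List Char) = ['+','+','+'] := by decide
  have e4 : ("+++ ".toList : List Char) = ['+','+','+',' '] := by decide
  have e5 : ("+".toList : List Char) = ['+'] := by decide
  have e6 : ("-".toList : List Char) = ['-'] := by decide
  have e7 : ("@@".toList : List Char) = ['@','@'] := by decide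
  simp only [e1, e2, e3, e4, e5, e6, e7]
  set l := line.toList with hl
  by_cases h3 : PySem.Chars.startswith l ['-','-','-'] = true
  · have f1 : PySem.Chars.startswith l ['+','+','+',' '] = false :=
      vps_sw_head_ne l ['-','-'] _ '-' '+' (by decide) h3
    have f2 : PySem.Chars.startswith l ['+'] = false :=
      vps_sw_head_ne l ['-','-'] _ '-' '+' (by decide) h3
    have f3 : PySem.Chars.startswith l ['+','+','+'] = false :=
      vps_sw_head_ne l ['-','-'] _ '-' '+' (by decide) h3
    have f4 : PySem.Chars.startswith l ['@','@'] = false :=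
      vps_sw_head_ne l ['-','-'] _ '-' '@' (by decide) h3
    cases c : PySem.Chars.startswith l ['-','-','-',' '] <;>
      simp [h3, f1, f2, f3, f4, c, vpsBits]
  · rw [Bool.not_eq_true] at h3
    by_cases hm : PySem.Chars.startswith l ['-'] = true
    · have f2 : PySem.Chars.startswith l ['+'] = false :=
        vps_sw_head_ne l [] _ '-' '+' (by decide) hm
      have f3 : PySem.Chars.startswith l ['+','+','+'] = false :=
        vps_sw_head_ne l [] _ '-' '+' (by decide) hm
      have f1 : PySem.Chars.startswith l ['+','+','+',' '] = false :=
        vps_sw_head_ne l [] _ '-' '+' (by decide) hm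
      have f4 : PySem.Chars.startswith l ['@','@'] = false :=
        vps_sw_head_ne l [] _ '-' '@' (by decide) hm
      have f5 : PySem.Chars.startswith l ['-','-','-',' '] = false :=
        vps_sw_mono_false l ['-','-','-'] _ (by decide) h3
      simp [h3, hm, f1, f2, f3, f4, f5, vpsBits]
    · rw [Bool.not_eq_true] at hm
      have f5 : PySem.Chars.startswith l ['-','-','-',' '] = false :=
        vps_sw_mono_false l ['-'] _ (by decide) hm
      by_cases hp3 : PySem.Chars.startswith l ['+','+','+'] = true
      · have f4 : PySem.Chars.startswith l ['@','@'] = false :=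
          vps_sw_head_ne l ['+','+'] _ '+' '@' (by decide) hp3
        cases c : PySem.Chars.startswith l ['+','+','+',' '] <;>
          simp [h3, hm, hp3, f4, f5, c, vpsBits]
      · rw [Bool.not_eq_true] at hp3
        have f6 : PySem.Chars.startswith l ['+','+','+',' '] = false :=
          vps_sw_mono_false l ['+','+','+'] _ (by decide) hp3
        by_cases hpl : PySem.Chars.startswith l ['+'] = true
        · have f4 : PySem.Chars.startswith l ['@','@'] = false :=
            vps_sw_head_ne l [] _ '+' '@' (by decide) hpl
          simp [h3, hm, hp3, hpl, f4, f5, f6, vpsBits]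
        · rw [Bool.not_eq_true] at hpl
          cases c : (PySem.Chars.startswith l ['@','@'] && PySem.Chars.endswith l ['@','@']) <;>
            simp [h3, hm, hp3, hpl, f5, f6, c, vpsBits]

theorem vpsBits_or (a b c d a' b' c' d' : Bool) :
    vpsBits a b c d ||| vpsBits a' b' c' d' = vpsBits (a || a') (b || b') (c || c') (d || d') := by
  cases a <;> cases b <;> cases c <;> cases d <;> cases a' <;> cases b' <;> cases c' <;> cases d' <;> decide

theorem vpsFold_eq (lines : List String) (a b c d : Bool) :
    lines.foldl (fun m line => m ||| lineMask line) (vpsBits a b c d) =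
      vpsBits (a || lines.any (fun line => PySem.Str.startswith line "--- "))
        (b || lines.any (fun line => PySem.Str.startswith line "+++ "))
        (c || lines.any (fun line => PySem.Str.startswith line "@@" && PySem.Str.endswith line "@@"))
        (d || lines.any (fun line =>
          (PySem.Str.startswith line "+" || PySem.Str.startswith line "-") &&
          !(PySem.Str.startswith line "+++" || PySem.Str.startswith line "---"))) := by
  induction lines generalizing a b c d with
  | nil => simp
  | cons x xs ih =>
    simp only [List.foldl_cons, List.any_cons, lineMask_eq x, vpsBits_or, ih, Bool.or_assoc]

theorem vpsBits_eq_15 (a b c d : Bool) : (vpsBits a b c d == 15) = (a && b && c && d) := by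
  cases a <;> cases b <;> cases c <;> cases d <;> decide

-- ===== VERDICT (by name: the statement is the Claim_ definition above) =====
theorem validate_patch_structure_spec : Claim_equal_validate_patch_structure := by
  intro patch _
  unfold Spec_validate_patch_structure validate_patch_structure validate_patch_structure_alt
  by_cases hp : patch == ""
  · simp [hp]
  · simp only [hp, if_false, Bool.false_eq_true]
    have h0 : (0 : Nat) = vpsBits false false false false := rfl
    rw [h0, vpsFold_eq]
    simp [vpsBits_eq_15]
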